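-- pv_equiv track=rewrite | github.com/Victini00/Jongman_PS | JongMan_Ps/완벽히 푼 것/8장/PI.py | difficulty
-- ===== SOURCE A (Python) =====
-- def difficulty(lis):
--     lis_len = len(lis)
--
--     sub_list = [0 for _ in range(lis_len-1)]
--     sub_len = len(sub_list)
--
--     for i in range(lis_len-1):
--         sub_list[i] = int(lis[i]) - int(lis[i+1])
--
--     # 이제 sub list를 돌며 난이도를 확인한다.
--     if sub_list.count(0) == sub_len:
--         return 1
--
--     elif sub_list.count(1) == sub_len or sub_list.count(-1) == sub_len:
--         return 2
--
--     elif lis.count(lis[0]) + lis.count(lis[1]) == lis_len: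
--         return 4
--
--     elif sub_list.count(sub_list[0]) == sub_len:
--         return 5
--
--     else:
--         return 10
-- ===== SOURCE B (Python) =====
-- def difficulty(lis):
--     n = len(lis)
--     if n < 2:
--         return 1  # no differences: constant sequence, difficulty 1
--     all0 = allp = allm = allf = True
--     fd = int(lis[0]) - int(lis[1])  # first difference
--     prev = int(lis[0])
--     for s in lis[1:]:
--         v = int(s)
--         d = prev - v
--         all0 = all0 and d == 0
--         allp = allp and d == 1
--         allm = allm and d == -1
--         allf = allf and d == fd
--         prev = v
--     if all0:
--         return 1
--     if allp or allm:
--         return 2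
--     if sum((s == lis[0]) + (s == lis[1]) for s in lis) == n:
--         return 4
--     if allf:
--         return 5
--     return 10
-- ===== Notes on version B (the rewrite author's own statement) =====
-- stated objective: simpler
-- what changed: Replaces the materialized difference table and its five repeated .count scans with a single flag-maintaining pass over consecutive elements (plus one counting sum for the branch-4 test), with an early return for lists shorter than 2.
import Mathlib
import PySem

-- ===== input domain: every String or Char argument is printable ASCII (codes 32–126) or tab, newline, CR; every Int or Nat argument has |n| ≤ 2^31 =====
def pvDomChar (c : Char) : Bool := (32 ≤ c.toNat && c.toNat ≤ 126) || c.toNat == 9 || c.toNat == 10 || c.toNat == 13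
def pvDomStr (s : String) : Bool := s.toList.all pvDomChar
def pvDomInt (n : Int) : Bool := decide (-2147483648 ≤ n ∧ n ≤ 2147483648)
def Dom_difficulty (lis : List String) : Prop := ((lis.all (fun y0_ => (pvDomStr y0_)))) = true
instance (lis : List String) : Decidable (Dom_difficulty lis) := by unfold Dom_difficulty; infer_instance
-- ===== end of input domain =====

-- B replaces A's materialized difference table and five repeated .count scans by one
-- flag-maintaining pass over consecutive elements plus one counting pass (objective: simpler).

-- int(s), total form: both Pythons raise ValueError on unparsable strings, which Pre_ excludes.
def pvParse (s : String) : Int := (PySem.Int.ofStr? s).getD 0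

-- ===== PORT A =====
def difficulty (lis : List String) : Int :=
  let lisLen : Int := (lis.length : Int)
  -- 'sub_list = [0]*...; for i in range(lis_len-1): sub_list[i] = int(lis[i]) - int(lis[i+1])'
  -- = the list whose i-th entry, for i in range(lis_len-1), is that difference:
  let subList : List Int := (PySem.List.pyRange 0 (lisLen - 1) 1).map
    (fun i => pvParse ((PySem.List.pyGet? lis i).getD "")
            - pvParse ((PySem.List.pyGet? lis (i + 1)).getD ""))
  let subLen : Int := (subList.length : Int)
  if (PySem.List.count subList 0 : Int) = subLen then 1
  else if (PySem.List.count subList 1 : Int) = subLen ∨ (PySem.List.count subList (-1) : Int) = subLen then 2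
  else if (PySem.List.count lis ((PySem.List.pyGet? lis 0).getD "") : Int)
        + (PySem.List.count lis ((PySem.List.pyGet? lis 1).getD "") : Int) = lisLen then 4
  else if (PySem.List.count subList ((PySem.List.pyGet? subList 0).getD 0) : Int) = subLen then 5
  else 10

-- ===== PORT B =====
def difficulty_alt (lis : List String) : Int :=
  let n : Int := (lis.length : Int)
  if n < 2 then 1
  else
    let l0 : String := (PySem.List.pyGet? lis 0).getD ""
    let l1 : String := (PySem.List.pyGet? lis 1).getD ""
    let fd : Int := pvParse l0 - pvParse l1
    let st : Bool × Bool × Bool × Bool × Int :=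
      (PySem.List.slice lis (some 1) none).foldl
        (fun st s =>
          let v := pvParse s
          let d := st.2.2.2.2 - v
          (st.1 && decide (d = 0), st.2.1 && decide (d = 1),
           st.2.2.1 && decide (d = -1), st.2.2.2.1 && decide (d = fd), v))
        (true, true, true, true, pvParse l0)
    if st.1 then 1
    else if st.2.1 || st.2.2.1 then 2
    else if lis.foldl (fun acc s => acc + (if s = l0 then (1 : Int) else 0) + (if s = l1 then 1 else 0)) 0 = n then 4
    else if st.2.2.2.1 then 5
    else 10

-- ===== PRECONDITION & SPEC =====
-- Pre_ excludes exactly the inputs where Python A raises ValueError: a list of length ≥ 2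
-- containing a string int() rejects (with length ≤ 1, A returns 1 without parsing anything).
def Pre_difficulty (lis : List String) : Prop :=
  lis.length ≤ 1 ∨ ∀ s ∈ lis, (PySem.Int.ofStr? s).isSome = true
instance (lis : List String) : Decidable (Pre_difficulty lis) := by unfold Pre_difficulty; infer_instance
def pvWitness_difficulty : List String := (["1", "2", "4"])

def Spec_difficulty (lis : List String) (out : Int) : Prop := out = difficulty_alt lis
instance (lis : List String) (out : Int) : Decidable (Spec_difficulty lis out) := by unfold Spec_difficulty; infer_instance

-- ===== CLAIM (what is proved, stated in full; the proofs are below) =====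
def Claim_equal_difficulty : Prop := ∀ (lis : List String), Dom_difficulty lis → Pre_difficulty lis → Spec_difficulty lis (difficulty lis)

-- ===== LEMMAS AND PROOFS =====

-- consecutive differences of p :: vs
def diffsFrom (p : Int) : List Int → List Int
  | [] => []
  | v :: vs => (p - v) :: diffsFrom v vs

-- the final 'prev' of B's loop
def lastParse (p : Int) : List String → Int
  | [] => p
  | s :: xs => lastParse (pvParse s) xs

lemma subList_eq (a : String) (rest : List String) :
    (PySem.List.pyRange 0 (((a :: rest).length : Int) - 1) 1).map
      (fun i => pvParse ((PySem.List.pyGet? (a :: rest) i).getD "")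
              - pvParse ((PySem.List.pyGet? (a :: rest) (i + 1)).getD ""))
    = diffsFrom (pvParse a) (rest.map pvParse) := by
  rw [PySem.List.pyRange_one, List.map_map]
  have hl : (((((a :: rest).length : Int)) - 1) - 0).toNat = rest.length := by simp
  rw [hl]
  induction rest generalizing a with
  | nil => simp [diffsFrom]
  | cons b t ih =>
    simp only [List.length_cons]
    rw [List.range_succ_eq_map, List.map_cons, List.map_map]
    refine congrArg₂ List.cons ?_ ?_
    · simp
    · rw [← ih b (by simp)]
      refine List.map_congr_left fun k hk => ?_
      simp [Function.comp, Nat.cast_succ]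
      have h2 : ((k:Int) + 1 + 1) = ((k+1 : Nat) : Int) + 1 := by push_cast; ring
      rw [h2, PySem.List.pyGet?_cons_succ]
      simp

lemma fold_eq (xs : List String) (fd p : Int) (a0 ap am af : Bool) :
    xs.foldl
      (fun (st : Bool × Bool × Bool × Bool × Int) s =>
        let v := pvParse s
        let d := st.2.2.2.2 - v
        (st.1 && decide (d = 0), st.2.1 && decide (d = 1),
         st.2.2.1 && decide (d = -1), st.2.2.2.1 && decide (d = fd), v))
      (a0, ap, am, af, p)
    = (a0 && (diffsFrom p (xs.map pvParse)).all (· == 0),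
       ap && (diffsFrom p (xs.map pvParse)).all (· == 1),
       am && (diffsFrom p (xs.map pvParse)).all (· == -1),
       af && (diffsFrom p (xs.map pvParse)).all (· == fd),
       lastParse p xs) := by
  induction xs generalizing p a0 ap am af with
  | nil => simp [diffsFrom, lastParse]
  | cons s xs ih =>
    simp only [List.foldl_cons, List.map_cons, diffsFrom, List.all_cons, lastParse, ih,
      Bool.and_assoc]
    rfl

lemma count_fold (xs : List String) (l0 l1 : String) (acc : Int) :
    xs.foldl (fun acc s => acc + (if s = l0 then (1 : Int) else 0) + (if s = l1 then 1 else 0)) acc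
    = acc + (xs.count l0 : Int) + (xs.count l1 : Int) := by
  induction xs generalizing acc with
  | nil => simp
  | cons s xs ih =>
    simp only [List.foldl_cons, ih, List.count_cons, beq_iff_eq]
    by_cases h0 : s = l0 <;> by_cases h1 : s = l1 <;>
      simp only [h0, h1, if_pos, if_neg, not_false_iff] <;>
      push_cast <;> ring

lemma count_all (D : List Int) (v : Int) :
    ((List.count v D : Int) = (D.length : Int)) ↔ (D.all (· == v) = true) := by
  rw [Nat.cast_inj, List.count_eq_length, List.all_eq_true]
  simp only [beq_iff_eq]
  exact ⟨fun h x hx => (h x hx).symm, fun h x hx => (h x hx).symm⟩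

theorem difficulty_spec : Claim_equal_difficulty := by
  intro lis _ _
  unfold Spec_difficulty
  match lis with
  | [] => decide
  | [s] =>
    simp [difficulty, difficulty_alt, PySem.List.pyRange_one_eq_nil, PySem.List.count]
  | a :: b :: t =>
    have hsub := subList_eq a (b :: t)
    simp only [difficulty, difficulty_alt, hsub]
    simp only [PySem.List.slice_from_one, List.tail_cons, fold_eq, Bool.true_and, count_fold]
    have hg1 : PySem.List.pyGet? (a :: b :: t) (1 : Int) = some b := by
      rw [show (1 : Int) = ((0 : Nat) : Int) + 1 by simp, PySem.List.pyGet?_cons_succ]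
      simp
    rw [if_neg (show ¬(((a :: b :: t).length : Int) < 2) by push_cast [List.length_cons]; omega)]
    simp only [PySem.List.pyGet?_zero_cons, hg1, Option.getD_some, List.map_cons, diffsFrom,
      PySem.List.count_eq, zero_add]
    simp only [count_all, Bool.or_eq_true]
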